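-- pv_equiv track=rewrite | github.com/NullDatum/recursive-agency | 05_CRYPTO_ANALYSIS_DEMO/r2d2_crypto_demo.py | mutate_and_expand
-- ===== SOURCE A (Python) =====
-- from typing import Dict, List, Tuple
--
-- def mutate_and_expand(
--     hash160s: List[str], key_segments: List[str]
-- ) -> Tuple[Dict[str, List[str]], Dict[str, List[str]]]:
--     """Generate hypotheses based on overlapping prefixes and mirrored segments."""
--     overlaps: Dict[str, List[str]] = {}
--     for seg in key_segments:
--         overlaps[seg] = [h for h in hash160s if h.startswith(seg)]
--
--     # Mutate: mirror inversion of segments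
--     mirrored_segments = [seg[::-1] for seg in key_segments]
--
--     mirrored_overlaps: Dict[str, List[str]] = {}
--     for seg in mirrored_segments:
--         mirrored_overlaps[seg] = [h for h in hash160s if h.startswith(seg)]
--
--     return overlaps, mirrored_overlaps
-- ===== SOURCE B (Python) =====
-- # B: prefix-index lookup — group the hashes once per distinct segment length
-- # into a prefix -> hashes dictionary, then answer every segment by one lookup.
-- from typing import Dict, List, Tuple
--
-- def mutate_and_expand(
--     hash160s: List[str], key_segments: List[str]
-- ) -> Tuple[Dict[str, List[str]], Dict[str, List[str]]]:
--     mirrored = [seg[::-1] for seg in key_segments]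
--     index: Dict[int, Dict[str, List[str]]] = {}
--     for L in {len(seg) for seg in key_segments + mirrored}:
--         buckets: Dict[str, List[str]] = {}
--         for h in hash160s:
--             buckets.setdefault(h[:L], []).append(h)
--         index[L] = buckets
--
--     def lookup(seg: str) -> List[str]:
--         return index[len(seg)].get(seg, [])
--
--     return ({seg: lookup(seg) for seg in key_segments},
--             {seg: lookup(seg) for seg in mirrored})
-- ===== Notes on version B (the rewrite author's own statement) =====
-- stated objective: faster
-- what changed: Instead of scanning the whole hash list with startswith once per segment, B builds, for each distinct segment length L, a dictionary grouping the hashes by their L-character prefix in one pass, and then answers every segment and mirrored segment by a single dictionary lookup.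
import Mathlib
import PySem

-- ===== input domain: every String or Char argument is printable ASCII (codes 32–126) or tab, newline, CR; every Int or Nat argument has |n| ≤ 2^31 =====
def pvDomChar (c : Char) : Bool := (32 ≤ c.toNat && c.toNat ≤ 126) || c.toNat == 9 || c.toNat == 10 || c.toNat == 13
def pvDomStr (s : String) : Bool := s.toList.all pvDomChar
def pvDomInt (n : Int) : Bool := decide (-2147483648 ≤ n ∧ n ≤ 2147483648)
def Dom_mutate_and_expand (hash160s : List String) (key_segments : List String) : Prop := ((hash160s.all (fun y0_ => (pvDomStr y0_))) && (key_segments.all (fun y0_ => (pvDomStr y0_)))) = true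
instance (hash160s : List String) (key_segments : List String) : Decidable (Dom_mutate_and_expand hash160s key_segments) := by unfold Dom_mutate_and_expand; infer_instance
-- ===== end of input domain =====

-- B replaces A's per-segment startswith-scan of the hash list by a prefix index:
-- one grouping pass per distinct segment length, then a dictionary lookup per segment.

-- ===== PORT A =====
def mutate_and_expand (hash160s : List String) (key_segments : List String) : (List (String × List String)) × (List (String × List String)) :=
  let overlaps : PySem.Dict String (List String) :=
    key_segments.foldl (fun d seg =>
      d.insert seg (hash160s.filter (fun h => PySem.Str.startswith h seg))) PySem.Dict.empty
  let mirrored_segments : List String :=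
    key_segments.map (fun seg => ((PySem.Str.slice? seg none none (-1)).getD seg))
  let mirrored_overlaps : PySem.Dict String (List String) :=
    mirrored_segments.foldl (fun d seg =>
      d.insert seg (hash160s.filter (fun h => PySem.Str.startswith h seg))) PySem.Dict.empty
  (overlaps.items, mirrored_overlaps.items)

-- ===== PORT B =====
-- inner loop: buckets.setdefault(h[:L], []).append(h) over hash160s
def pvBuckets (hash160s : List String) (L : Int) : PySem.Dict String (List String) :=
  hash160s.foldl (fun d h =>
    let k := PySem.Str.slice h none (some L)
    d.insert k (d.getD k [] ++ [h])) PySem.Dict.empty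

-- outer loop: index[L] = buckets, over the distinct segment lengths
def pvIndex (hash160s : List String) (lens : List Int) : PySem.Dict Int (PySem.Dict String (List String)) :=
  lens.foldl (fun d L => d.insert L (pvBuckets hash160s L)) PySem.Dict.empty

-- index[len(seg)].get(seg, []); index always contains len(seg) at the call sites
def pvLookup (index : PySem.Dict Int (PySem.Dict String (List String))) (seg : String) : List String :=
  ((index.get? (PySem.Str.len seg)).getD PySem.Dict.empty).getD seg []

def mutate_and_expand_alt (hash160s : List String) (key_segments : List String) : (List (String × List String)) × (List (String × List String)) :=
  let mirrored : List String :=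
    key_segments.map (fun seg => ((PySem.Str.slice? seg none none (-1)).getD seg))
  let lens : PySem.Set Int := PySem.Set.ofList ((key_segments ++ mirrored).map PySem.Str.len)
  let index := pvIndex hash160s lens
  ((key_segments.foldl (fun d seg => d.insert seg (pvLookup index seg)) PySem.Dict.empty).items,
   (mirrored.foldl (fun d seg => d.insert seg (pvLookup index seg)) PySem.Dict.empty).items)

-- ===== PRECONDITION & SPEC =====
def Spec_mutate_and_expand (hash160s : List String) (key_segments : List String) (out : (List (String × List String)) × (List (String × List String))) : Prop := out = mutate_and_expand_alt hash160s key_segments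
instance (hash160s : List String) (key_segments : List String) (out : (List (String × List String)) × (List (String × List String))) : Decidable (Spec_mutate_and_expand hash160s key_segments out) := by unfold Spec_mutate_and_expand; infer_instance

-- ===== CLAIM (what is proved, stated in full; the proofs are below) =====
def Claim_equal_mutate_and_expand : Prop := ∀ (hash160s : List String) (key_segments : List String), Dom_mutate_and_expand hash160s key_segments → Spec_mutate_and_expand hash160s key_segments (mutate_and_expand hash160s key_segments)

-- ===== LEMMAS AND PROOFS =====

-- Inserting (s, F s) into a dict whose items are L.map (fun t => (t, F t)) yields
-- the dict keyed by PySem.Set.add L s (overwrite rewrites an entry with itself).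
theorem pv_insert_mk_map (F : String → List String) (L : List String) (s : String) :
    (PySem.Dict.mk (L.map (fun t => (t, F t)))).insert s (F s)
      = PySem.Dict.mk ((PySem.Set.add L s).map (fun t => (t, F t))) := by
  apply PySem.Dict.ext
  by_cases hs : s ∈ L
  · have hc : (PySem.Dict.mk (L.map (fun t => (t, F t)))).contains s = true := by
      rw [PySem.Dict.contains_iff_mem_keys, PySem.Dict.keys_mk, List.map_map]
      simpa using hs
    rw [PySem.Dict.items_insert_of_contains _ _ hc]
    have hadd : PySem.Set.add L s = L := by
      simp [PySem.Set.add, PySem.Set.contains, hs]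
    rw [hadd, List.map_map]
    apply List.map_congr_left
    intro a _
    simp only [Function.comp]
    by_cases h : a = s
    · subst h; simp
    · simp [h]
  · have hc : (PySem.Dict.mk (L.map (fun t => (t, F t)))).contains s = false := by
      rw [← Bool.not_eq_true, PySem.Dict.contains_iff_mem_keys, PySem.Dict.keys_mk, List.map_map]
      simpa using hs
    rw [PySem.Dict.items_insert_of_not_contains _ _ hc]
    have hadd : PySem.Set.add L s = L ++ [s] := by
      simp [PySem.Set.add, PySem.Set.contains, hs]
    simp [hadd]

-- Folding key-value inserts (value a function of the key) over segs, starting from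
-- the map-formed dict on L, gives the map-formed dict on Set.update L segs.
theorem pv_foldl_insert_map (F : String → List String) :
    ∀ (segs : List String) (L : List String),
      (segs.foldl (fun d s => d.insert s (F s)) (PySem.Dict.mk (L.map (fun t => (t, F t))))).items
        = (PySem.Set.update L segs).map (fun t => (t, F t)) := by
  intro segs
  induction segs with
  | nil => intro L; simp [PySem.Set.update_nil]
  | cons s rest ih =>
    intro L
    rw [List.foldl_cons, pv_insert_mk_map F L s, ih (PySem.Set.add L s), PySem.Set.update_cons]

-- A key-value-insert fold (value a function of the key) yields the dedup'd map form.
theorem pv_items_foldl_insert (F : String → List String) (segs : List String) :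
    (segs.foldl (fun d s => d.insert s (F s)) PySem.Dict.empty).items
      = (PySem.Set.ofList segs).map (fun t => (t, F t)) := by
  have h := pv_foldl_insert_map F segs []
  simpa [PySem.Dict.empty, PySem.Set.update_nil_left] using h

-- Folding inserts over keys not containing k leaves get? k unchanged.
theorem pv_get?_foldl_insert_not_mem (hash160s : List String) (k : Int) :
    ∀ (Ls : List Int) (d : PySem.Dict Int (PySem.Dict String (List String))),
      k ∉ Ls → (Ls.foldl (fun d L => d.insert L (pvBuckets hash160s L)) d).get? k = d.get? k := by
  intro Ls
  induction Ls with
  | nil => intro d _; rfl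
  | cons L rest ih =>
    intro d hk
    rw [List.foldl_cons, ih _ (fun h => hk (List.mem_cons_of_mem _ h)),
        PySem.Dict.get?_insert_of_ne _ _ (fun h : k = L => hk (h ▸ List.mem_cons_self))]

-- The length index returns the bucket dict for every listed length.
theorem pv_get?_index (hash160s : List String) (k : Int) :
    ∀ (Ls : List Int) (d : PySem.Dict Int (PySem.Dict String (List String))),
      k ∈ Ls → (Ls.foldl (fun d L => d.insert L (pvBuckets hash160s L)) d).get? k
        = some (pvBuckets hash160s k) := by
  intro Ls
  induction Ls with
  | nil => intro d h; cases h
  | cons L rest ih =>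
    intro d hk
    rw [List.foldl_cons]
    by_cases hr : k ∈ rest
    · exact ih _ hr
    · have hkL : k = L := by
        rcases List.mem_cons.mp hk with h | h
        · exact h
        · exact absurd h hr
      subst hkL
      rw [pv_get?_foldl_insert_not_mem hash160s k rest _ hr, PySem.Dict.get?_insert_self]

-- The bucket loop groups: the bucket at key k holds the hashes whose L-prefix is k.
theorem pv_buckets_getD (L : Int) (k : String) :
    ∀ (hs : List String) (d : PySem.Dict String (List String)),
      (hs.foldl (fun d h =>
          let p := PySem.Str.slice h none (some L)
          d.insert p (d.getD p [] ++ [h])) d).getD k []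
        = d.getD k [] ++ hs.filter (fun h => PySem.Str.slice h none (some L) == k) := by
  intro hs
  induction hs with
  | nil => intro d; simp
  | cons h rest ih =>
    intro d
    rw [List.foldl_cons]
    simp only []
    rw [ih, List.filter_cons]
    by_cases he : PySem.Str.slice h none (some L) = k
    · subst he
      rw [PySem.Dict.getD_insert_self]
      simp
    · rw [PySem.Dict.getD_insert_of_ne _ _ _ (fun hh => he hh.symm)]
      simp [he]

-- Prefix-of-length-|seg| equality is exactly startswith.
theorem pv_slice_eq_startswith (seg h : String) :
    (PySem.Str.slice h none (some (PySem.Str.len seg)) == seg)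
      = PySem.Str.startswith h seg := by
  have hto : (PySem.Str.slice h none (some (PySem.Str.len seg))).toList
      = h.toList.take seg.toList.length := by
    rw [PySem.Str.len_eq]
    simp [PySem.Str.toList_slice, PySem.Chars.slice_eq_listSlice, PySem.List.slice_to_natCast]
  have hiff : PySem.Str.slice h none (some (PySem.Str.len seg)) = seg
      ↔ PySem.Str.startswith h seg = true := by
    constructor
    · intro he
      have hl : h.toList.take seg.toList.length = seg.toList := by
        rw [← hto, he]
      simp only [PySem.Str.startswith_eq]
      exact (PySem.Chars.startswith_iff _ _).mpr (List.prefix_iff_eq_take.mpr hl.symm)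
    · intro hs
      apply String.toList_inj.mp
      rw [hto]
      simp only [PySem.Str.startswith_eq] at hs
      exact (List.prefix_iff_eq_take.mp ((PySem.Chars.startswith_iff _ _).mp hs)).symm
  by_cases hs : PySem.Str.startswith h seg = true
  · rw [hs, beq_iff_eq.mpr (hiff.mpr hs)]
  · simp only [Bool.not_eq_true] at hs
    rw [hs, beq_eq_false_iff_ne]
    intro he
    rw [hiff.mp he] at hs
    cases hs

-- For a segment whose length is indexed, the lookup is A's startswith filter.
theorem pv_lookup_eq (hash160s : List String) (lens : List Int) (seg : String)
    (hmem : PySem.Str.len seg ∈ lens) :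
    pvLookup (pvIndex hash160s lens) seg
      = hash160s.filter (fun h => PySem.Str.startswith h seg) := by
  unfold pvLookup pvIndex
  rw [pv_get?_index hash160s _ lens _ hmem]
  show (pvBuckets hash160s (PySem.Str.len seg)).getD seg [] = _
  unfold pvBuckets
  rw [pv_buckets_getD]
  simp only [PySem.Dict.empty]
  rw [List.filter_congr (fun h _ => pv_slice_eq_startswith seg h)]
  rfl

-- ===== VERDICT (by name: the statement is the Claim_ definition above) =====
theorem mutate_and_expand_spec : Claim_equal_mutate_and_expand := by
  intro hash160s key_segments _
  unfold Spec_mutate_and_expand mutate_and_expand mutate_and_expand_alt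
  simp only []
  set mirrored := key_segments.map (fun seg => ((PySem.Str.slice? seg none none (-1)).getD seg)) with hm
  set lens := PySem.Set.ofList ((key_segments ++ mirrored).map PySem.Str.len) with hl
  have hlens : ∀ s, s ∈ key_segments ++ mirrored → PySem.Str.len s ∈ lens := by
    intro s hs
    rw [hl]
    exact (PySem.Set.mem_ofList _ _).mpr (List.mem_map_of_mem hs)
  have hside : ∀ segs : List String, (∀ s ∈ segs, s ∈ key_segments ++ mirrored) →
      (segs.foldl (fun d seg => d.insert seg (pvLookup (pvIndex hash160s lens) seg)) PySem.Dict.empty).items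
        = (segs.foldl (fun d seg =>
            d.insert seg (hash160s.filter (fun h => PySem.Str.startswith h seg))) PySem.Dict.empty).items := by
    intro segs hsub
    rw [pv_items_foldl_insert, pv_items_foldl_insert]
    apply List.map_congr_left
    intro s hsmem
    have : s ∈ segs := (PySem.Set.mem_ofList _ _).mp hsmem
    rw [pv_lookup_eq hash160s lens s (hlens s (hsub s this))]
  exact Prod.ext ((hside key_segments (fun s hs => List.mem_append_left _ hs)).symm)
    ((hside mirrored (fun s hs => List.mem_append_right _ hs)).symm)
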